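-- pv_equiv track=rewrite | github.com/Peritract/adventofcode | 2019/day_12.py | solve_axis
-- ===== SOURCE A (Python) =====
-- from itertools import combinations
--
-- class Moon:
--     def __init__(self, position=(0,0,0), velocity=(0,0,0)):
--         self.x = position[0]
--         self.y = position[1]
--         self.z = position[2]
--         self.vx = velocity[0]
--         self.vy = velocity[1]
--         self.vz = velocity[2]
--
--     def __repr__(self):
--         return f"pos=<X: {self.x}, Y: {self.y}, Z: {self.z}>, vel=<X: {self.vx}, Y: {self.vy}, Z: {self.vz}>"
--
--     def update_position_by_velocity(self):
--         self.x += self.vx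
--         self.y += self.vy
--         self.z += self.vz
--
--     def get_potential_energy(self):
--         return abs(self.x) + abs(self.y) + abs(self.z)
--
--     def get_kinetic_energy(self):
--         return abs(self.vx) + abs(self.vy) + abs(self.vz)
--
--     def get_total_energy(self):
--         return self.get_kinetic_energy() * self.get_potential_energy()
--
--     def apply_gravity(self, other):
--         if self == other:
--             return
--         if self.x != other.x:
--             if self.x > other.x:
--                 self.vx -= 1
--             else:
--                 self.vx += 1
--         if self.y != other.y:
--             if self.y > other.y:
--                 self.vy -= 1
--             else:
--                 self.vy += 1
--         if self.z != other.z: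
--             if self.z > other.z:
--                 self.vz -= 1
--             else:
--                 self.vz += 1
--
--     def get_pos(self):
--         return (self.x, self.y, self.z)
--
--     def get_vel(self):
--         return (self.vx, self.vy, self.vz)
--
-- def create_moons(coordinates):
--     moons = []
--     for line in coordinates:
--         data = [int(x.split("=")[1]) for x in line[1:-1].split(",")]
--         moons.append(Moon(data))
--     return moons
--
-- def apply_gravity(moons):
--     for x, y in combinations(moons, 2):
--         x.apply_gravity(y)
--         y.apply_gravity(x)
--
-- def solve_axis(data, index):
--     moons = create_moons(data)
--     step = 0
--     while True:
--         step += 1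
--         apply_gravity(moons)
--         for i in range(len(moons)):
--             moons[i].update_position_by_velocity()
--         if all([x.get_vel()[index] == 0 for x in moons]):
--             return step
-- ===== SOURCE B (Python) =====
-- def solve_axis(data, index):
--     # Histogram approach: parse only the requested axis; each step, build a value->count
--     # histogram and prefix-sums over its sorted distinct values, so every velocity update
--     # is a rank lookup instead of a pairwise scan.
--     pos = []
--     for line in data:
--         vals = [int(part.split("=")[1]) for part in line[1:-1].split(",")]
--         pos.append((vals[0], vals[1], vals[2])[index])
--     n = len(pos)
--     vel = [0] * n
--     step = 0
--     while True:
--         step += 1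
--         cnt = {}
--         for p in pos:
--             cnt[p] = cnt.get(p, 0) + 1
--         less = {}
--         acc = 0
--         for v in sorted(cnt):
--             less[v] = acc
--             acc += cnt[v]
--         vel = [vel[i] + (n - less[pos[i]] - cnt[pos[i]]) - less[pos[i]] for i in range(n)]
--         pos = [pos[i] + vel[i] for i in range(n)]
--         if all(v == 0 for v in vel):
--             return step
-- ===== Notes on version B (the rewrite author's own statement) =====
-- stated objective: alternative
-- what changed: B replaces A's 3-axis Moon-object simulation over all pairs (O(n^2) comparisons per step) by a single-axis simulation whose per-step velocity deltas come from a value->count histogram dict plus prefix sums over its sorted distinct values (delta_i = #greater - #less as rank lookups), with no pairwise loop at all.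
import Mathlib
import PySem

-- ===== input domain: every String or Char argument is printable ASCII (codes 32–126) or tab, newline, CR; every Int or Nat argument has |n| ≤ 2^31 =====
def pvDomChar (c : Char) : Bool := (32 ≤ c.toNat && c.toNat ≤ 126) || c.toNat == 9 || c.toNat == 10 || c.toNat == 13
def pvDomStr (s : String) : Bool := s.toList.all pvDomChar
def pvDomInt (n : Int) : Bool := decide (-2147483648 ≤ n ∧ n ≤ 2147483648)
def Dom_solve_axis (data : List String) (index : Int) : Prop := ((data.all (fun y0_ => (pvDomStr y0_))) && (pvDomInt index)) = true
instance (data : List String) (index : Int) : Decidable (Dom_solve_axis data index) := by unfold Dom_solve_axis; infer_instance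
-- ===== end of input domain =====

-- B replaces A's 3-axis Moon-object pairwise simulation by a one-axis simulation whose per-step
-- velocity deltas come from a value→count histogram and prefix sums over its sorted distinct
-- values (rank lookups, no pairwise loop); return values are proved equal on Pre_ (inputs where
-- A's parsing and tuple indexing succeed).

-- Shared parsing helper (this comprehension appears verbatim in A's create_moons and in B):
-- `[int(x.split("=")[1]) for x in line[1:-1].split(",")]`; none = the comprehension raises.
def pvPartsInts? : List String → Option (List Int)
  | [] => some []
  | p :: rest =>
    match PySem.Str.split? p "=" with
    | none => none
    | some fields =>
      match PySem.List.pyGet? fields 1 with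
      | none => none
      | some s =>
        match PySem.Int.ofStr? s with
        | none => none
        | some v =>
          match pvPartsInts? rest with
          | none => none
          | some vs => some (v :: vs)

def parseLine? (line : String) : Option (List Int) :=
  match PySem.Str.split? (PySem.Str.slice line (some 1) (some (-1))) "," with
  | none => none
  | some parts => pvPartsInts? parts

-- fuel bound making the ports' `while True` loops total; 0 is returned on exhaustion
def pvFuel : Nat := 2 ^ 64

-- the index pairs (i, j), i < j, visited by A's combinations(moons, 2)
def pvPairs (n : Nat) : List (Nat × Nat) :=
  (List.range n).flatMap (fun i => (List.range' (i + 1) (n - (i + 1))).map (fun j => (i, j)))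

-- ===== PORT A =====
structure PvMoon where
  x : Int
  y : Int
  z : Int
  vx : Int
  vy : Int
  vz : Int
deriving DecidableEq, Repr

def pvMoon0 : PvMoon := ⟨0, 0, 0, 0, 0, 0⟩

-- create_moons: Moon(data) reads data[0], data[1], data[2]; velocity defaults to (0,0,0)
def createMoons? : List String → Option (List PvMoon)
  | [] => some []
  | line :: rest =>
    match parseLine? line with
    | none => none
    | some vals =>
      match vals[0]?, vals[1]?, vals[2]? with
      | some x, some y, some z =>
        match createMoons? rest with
        | none => none
        | some ms => some (⟨x, y, z, 0, 0, 0⟩ :: ms)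
      | _, _, _ => none

-- Moon.apply_gravity(other) (the `self == other` identity guard never fires: combinations
-- yields pairs of distinct objects)
def pvGrav (a b : PvMoon) : PvMoon :=
  { a with
    vx := if a.x ≠ b.x then (if a.x > b.x then a.vx - 1 else a.vx + 1) else a.vx,
    vy := if a.y ≠ b.y then (if a.y > b.y then a.vy - 1 else a.vy + 1) else a.vy,
    vz := if a.z ≠ b.z then (if a.z > b.z then a.vz - 1 else a.vz + 1) else a.vz }

-- x.apply_gravity(y); y.apply_gravity(x) — mutation of the list modelled by set;
-- y reads x's state after x was updated, exactly as in Python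
def pvAPair (ms : List PvMoon) (p : Nat × Nat) : List PvMoon :=
  let mi := ms.getD p.1 pvMoon0
  let mj := ms.getD p.2 pvMoon0
  let ms1 := ms.set p.1 (pvGrav mi mj)
  let mi1 := ms1.getD p.1 pvMoon0
  ms1.set p.2 (pvGrav mj mi1)

def pvApplyGravity (ms : List PvMoon) : List PvMoon :=
  (pvPairs ms.length).foldl pvAPair ms

def pvMove (ms : List PvMoon) : List PvMoon :=
  ms.map (fun m => { m with x := m.x + m.vx, y := m.y + m.vy, z := m.z + m.vz })

-- get_vel()[index]: tuple indexing; `== some 0` is False where Python would raise IndexError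
-- (those inputs are outside Pre_)
def pvLoopA (index : Int) : List PvMoon → Int → Nat → Int
  | _, _, 0 => 0
  | ms, step, fuel + 1 =>
    let step := step + 1
    let ms := pvMove (pvApplyGravity ms)
    if ms.all (fun m => PySem.List.pyGet? [m.vx, m.vy, m.vz] index == some 0)
    then step
    else pvLoopA index ms step fuel

def solve_axis (data : List String) (index : Int) : Int :=
  match createMoons? data with
  | none => 0   -- Python raises while parsing here; outside Pre_
  | some moons => pvLoopA index moons 0 pvFuel

-- ===== PORT B =====
-- pos.append((vals[0], vals[1], vals[2])[index])
def pvParsePos? (index : Int) : List String → Option (List Int)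
  | [] => some []
  | line :: rest =>
    match parseLine? line with
    | none => none
    | some vals =>
      match vals[0]?, vals[1]?, vals[2]? with
      | some x, some y, some z =>
        match PySem.List.pyGet? [x, y, z] index with
        | none => none
        | some p =>
          match pvParsePos? index rest with
          | none => none
          | some ps => some (p :: ps)
      | _, _, _ => none

-- cnt = {}; for p in pos: cnt[p] = cnt.get(p, 0) + 1
def pvCnt (pos : List Int) : PySem.Dict Int Int :=
  pos.foldl (fun d p => d.insert p (d.getD p 0 + 1)) PySem.Dict.empty

-- less = {}; acc = 0; for v in sorted(cnt): less[v] = acc; acc += cnt[v]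
-- (cnt[v] is looked up at a key of cnt, so the Python lookup never raises; getD _ 0 is exact)
def pvLess (cnt : PySem.Dict Int Int) : PySem.Dict Int Int :=
  ((PySem.List.sorted cnt.keys (fun v => v)).foldl
    (fun st v => (st.1.insert v st.2, st.2 + cnt.getD v 0)) (PySem.Dict.empty, (0 : Int))).1

-- the two list comprehensions and the termination test of B's while-loop
-- (less[pos[i]] / cnt[pos[i]] are lookups at keys present in both dicts; getD _ 0 is exact)
def pvLoopC : List Int → List Int → Int → Nat → Int
  | _, _, _, 0 => 0
  | pos, vel, step, fuel + 1 =>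
    let step := step + 1
    let n := pos.length
    let cnt := pvCnt pos
    let less := pvLess cnt
    let vel := (List.range n).map (fun i =>
      vel.getD i 0 + ((n : Int) - less.getD (pos.getD i 0) 0 - cnt.getD (pos.getD i 0) 0)
        - less.getD (pos.getD i 0) 0)
    let pos := (List.range n).map (fun i => pos.getD i 0 + vel.getD i 0)
    if vel.all (fun v => v == 0) then step
    else pvLoopC pos vel step fuel

def solve_axis_alt (data : List String) (index : Int) : Int :=
  match pvParsePos? index data with
  | none => 0   -- parsing/indexing raises in Python here; outside Pre_
  | some pos => pvLoopC pos (List.replicate pos.length 0) 0 pvFuel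

-- ===== PRECONDITION & SPEC =====
-- shape of one comma-separated field: contains "=" and what follows "=" parses as an int
def pvPartOk (p : String) : Bool :=
  match PySem.Str.split? p "=" with
  | none => false
  | some fields =>
    match PySem.List.pyGet? fields 1 with
    | none => false
    | some s => (PySem.Int.ofStr? s).isSome
-- shape of one line: the comma-split of line[1:-1] has at least 3 fields, each of shape pvPartOk
def pvLineOk (l : String) : Bool :=
  match PySem.Str.split? (PySem.Str.slice l (some 1) (some (-1))) "," with
  | none => false
  | some parts => decide (3 ≤ parts.length) && parts.all pvPartOk
-- Pre_ = exactly the inputs where A returns normally: every line has at least three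
-- `…=int` fields, and (unless data is empty, where the index is never used) the tuple index
-- is in range for a 3-tuple.
def Pre_solve_axis (data : List String) (index : Int) : Prop :=
  data.all pvLineOk = true ∧ (data = [] ∨ (-3 ≤ index ∧ index < 3))

instance (data : List String) (index : Int) : Decidable (Pre_solve_axis data index) := by
  unfold Pre_solve_axis; infer_instance

def pvWitness_solve_axis : List String × Int := (["<x=1, y=2, z=3>", "<x=0, y=0, z=5>"], 0)

def Spec_solve_axis (data : List String) (index : Int) (out : Int) : Prop :=
  out = solve_axis_alt data index
instance (data : List String) (index : Int) (out : Int) : Decidable (Spec_solve_axis data index out) := by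
  unfold Spec_solve_axis; infer_instance

-- ===== CLAIM (what is proved, stated in full; the proofs are below) =====
def Claim_equal_solve_axis : Prop := ∀ (data : List String) (index : Int),
  Dom_solve_axis data index → Pre_solve_axis data index →
  Spec_solve_axis data index (solve_axis data index)

-- ===== LEMMAS AND PROOFS =====

-- ---- intermediate single-axis pairwise loop: proof-side bridge between the two ports ----
-- one pair update of the axis velocities, as A's apply_gravity does it on one axis
def pvBPair (pos : List Int) (vel : List Int) (p : Nat × Nat) : List Int :=
  let pi := pos.getD p.1 0
  let pj := pos.getD p.2 0
  if pi < pj then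
    let vel1 := vel.set p.1 (vel.getD p.1 0 + 1)
    vel1.set p.2 (vel1.getD p.2 0 - 1)
  else if pj < pi then
    let vel1 := vel.set p.1 (vel.getD p.1 0 - 1)
    vel1.set p.2 (vel1.getD p.2 0 + 1)
  else vel

def pvLoopM : List Int → List Int → Int → Nat → Int
  | _, _, _, 0 => 0
  | pos, vel, step, fuel + 1 =>
    let step := step + 1
    let vel := (pvPairs pos.length).foldl (pvBPair pos) vel
    let pos := List.zipWith (· + ·) pos vel
    if vel.all (fun v => v == 0) then step
    else pvLoopM pos vel step fuel

-- axis projections of a moon: position and velocity on axis k (k ≥ 3 projects to 0)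
def mpos (k : Nat) (m : PvMoon) : Int := [m.x, m.y, m.z].getD k 0
def mvel (k : Nat) (m : PvMoon) : Int := [m.vx, m.vy, m.vz].getD k 0

theorem pvPairs_mem {n : Nat} {p : Nat × Nat} (h : p ∈ pvPairs n) :
    p.1 < p.2 ∧ p.2 < n := by
  simp only [pvPairs, List.mem_flatMap, List.mem_map, List.mem_range] at h
  obtain ⟨i, hi, j, hj, hp⟩ := h
  have hj' := List.mem_range'_1.mp hj
  cases hp
  exact ⟨by omega, by omega⟩

theorem mpos_grav (k : Nat) (a b : PvMoon) : mpos k (pvGrav a b) = mpos k a := by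
  rcases k with _ | _ | _ | k <;> simp [mpos, pvGrav, List.getD]

theorem mvel_grav (k : Nat) (a b : PvMoon) :
    mvel k (pvGrav a b) = mvel k a +
      (if mpos k a < mpos k b then 1 else if mpos k b < mpos k a then -1 else 0) := by
  rcases k with _ | _ | _ | k <;>
    simp [mvel, mpos, pvGrav, List.getD] <;> split_ifs <;> omega

theorem mpos_moon0 (k : Nat) : mpos k pvMoon0 = 0 := by
  rcases k with _ | _ | _ | k <;> simp [mpos, pvMoon0, List.getD]

theorem mvel_moon0 (k : Nat) : mvel k pvMoon0 = 0 := by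
  rcases k with _ | _ | _ | k <;> simp [mvel, pvMoon0, List.getD]

theorem mvel_new (k : Nat) (x y z : Int) : mvel k ⟨x, y, z, 0, 0, 0⟩ = 0 := by
  rcases k with _ | _ | _ | k <;> simp [mvel, List.getD]

theorem set_getD_self {α : Type} (l : List α) (n : Nat) (d : α) :
    l.set n (l.getD n d) = l := by
  by_cases h : n < l.length
  · rw [List.getD_eq_getElem l d h]
    exact List.set_getElem_self h
  · exact List.set_eq_of_length_le (by omega)

theorem getD_set_ne {α : Type} (l : List α) {i j : Nat} (a d : α) (hne : i ≠ j) :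
    (l.set i a).getD j d = l.getD j d := by
  simp [List.getD, List.getElem?_set_ne hne]

theorem getD_set_self {α : Type} (l : List α) {i : Nat} (a d : α) (h : i < l.length) :
    (l.set i a).getD i d = a := by
  simp [List.getD, List.getElem?_set_self h]

theorem getD_mpos (k : Nat) (ms : List PvMoon) (n : Nat) :
    mpos k (ms.getD n pvMoon0) = (ms.map (mpos k)).getD n 0 := by
  rw [← mpos_moon0 k]
  exact (List.getD_map ms pvMoon0 (mpos k)).symm

theorem getD_mvel (k : Nat) (ms : List PvMoon) (n : Nat) :
    mvel k (ms.getD n pvMoon0) = (ms.map (mvel k)).getD n 0 := by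
  rw [← mvel_moon0 k]
  exact (List.getD_map ms pvMoon0 (mvel k)).symm

theorem map_mpos_aPair (k : Nat) (ms : List PvMoon) (p : Nat × Nat) :
    (pvAPair ms p).map (mpos k) = ms.map (mpos k) := by
  simp only [pvAPair, List.map_set, mpos_grav]
  rw [getD_mpos, getD_mpos, set_getD_self, set_getD_self]

theorem map_mvel_aPair (k : Nat) (ms : List PvMoon) {p : Nat × Nat}
    (h1 : p.1 < p.2) (h2 : p.2 < ms.length) :
    (pvAPair ms p).map (mvel k) = pvBPair (ms.map (mpos k)) (ms.map (mvel k)) p := by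
  obtain ⟨i, j⟩ := p
  simp only at h1 h2
  have hi : i < ms.length := lt_trans h1 h2
  have hne : i ≠ j := Nat.ne_of_lt h1
  have hmi1 : (ms.set i (pvGrav (ms.getD i pvMoon0) (ms.getD j pvMoon0))).getD i pvMoon0
      = pvGrav (ms.getD i pvMoon0) (ms.getD j pvMoon0) := by
    rw [List.getD_eq_getElem _ _ (by simpa using hi)]
    exact List.getElem_set_self (by simpa using hi)
  simp only [pvAPair, hmi1, List.map_set, mvel_grav, mpos_grav]
  rw [getD_mvel, getD_mvel, getD_mpos, getD_mpos]
  simp only [pvBPair]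
  split_ifs <;>
    first
      | (rw [add_zero, add_zero, set_getD_self, set_getD_self])
      | (rw [getD_set_ne _ _ _ hne]; congr 1 <;> omega)

theorem length_aPair (ms : List PvMoon) (p : Nat × Nat) :
    (pvAPair ms p).length = ms.length := by
  simp [pvAPair]

theorem map_gravity_fold (k : Nat) (ms : List PvMoon) (ps : List (Nat × Nat))
    (hb : ∀ p ∈ ps, p.1 < p.2 ∧ p.2 < ms.length) :
    (ps.foldl pvAPair ms).map (mpos k) = ms.map (mpos k) ∧
    (ps.foldl pvAPair ms).map (mvel k) = ps.foldl (pvBPair (ms.map (mpos k))) (ms.map (mvel k)) := by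
  induction ps generalizing ms with
  | nil => exact ⟨rfl, rfl⟩
  | cons p ps ih =>
    have hp := hb p (by simp)
    have hrest : ∀ q ∈ ps, q.1 < q.2 ∧ q.2 < (pvAPair ms p).length := by
      intro q hq
      rw [length_aPair]
      exact hb q (by simp [hq])
    obtain ⟨h1, h2⟩ := ih (pvAPair ms p) hrest
    constructor
    · rw [List.foldl_cons, h1, map_mpos_aPair]
    · rw [List.foldl_cons, h2, map_mpos_aPair, map_mvel_aPair k ms hp.1 hp.2,
        List.foldl_cons]

theorem zipWith_map_same (l : List PvMoon) (g h : PvMoon → Int) :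
    List.zipWith (· + ·) (l.map g) (l.map h) = l.map (fun m => g m + h m) := by
  induction l with
  | nil => rfl
  | cons a t ih => simp [ih]

theorem map_mpos_move (k : Nat) (ms : List PvMoon) :
    (pvMove ms).map (mpos k) = List.zipWith (· + ·) (ms.map (mpos k)) (ms.map (mvel k)) := by
  rw [zipWith_map_same]
  simp only [pvMove, List.map_map]
  apply List.map_congr_left
  intro m _
  rcases k with _ | _ | _ | k <;> simp [mpos, mvel, List.getD]

theorem map_mvel_move (k : Nat) (ms : List PvMoon) :
    (pvMove ms).map (mvel k) = ms.map (mvel k) := by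
  simp only [pvMove, List.map_map]
  apply List.map_congr_left
  intro m _
  rcases k with _ | _ | _ | k <;> simp [mvel, List.getD]

theorem loop_rel (index : Int) (k : Nat)
    (Hidx : ∀ a b c : Int, PySem.List.pyGet? [a, b, c] index = some ([a, b, c].getD k 0)) :
    ∀ (fuel : Nat) (ms : List PvMoon) (step : Int),
      pvLoopA index ms step fuel = pvLoopM (ms.map (mpos k)) (ms.map (mvel k)) step fuel := by
  intro fuel
  induction fuel with
  | zero => intro ms step; rfl
  | succ n ih =>
    intro ms step
    obtain ⟨hP, hV⟩ := map_gravity_fold k ms (pvPairs ms.length)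
      (fun p hp => pvPairs_mem hp)
    have hG : (pvApplyGravity ms).map (mpos k) = ms.map (mpos k) := hP
    have hGv : (pvApplyGravity ms).map (mvel k)
        = (pvPairs ms.length).foldl (pvBPair (ms.map (mpos k))) (ms.map (mvel k)) := hV
    have hfold : (pvPairs (ms.map (mpos k)).length).foldl (pvBPair (ms.map (mpos k))) (ms.map (mvel k))
        = (pvMove (pvApplyGravity ms)).map (mvel k) := by
      rw [List.length_map, ← hGv, map_mvel_move]
    have hpos' : List.zipWith (· + ·) (ms.map (mpos k)) ((pvMove (pvApplyGravity ms)).map (mvel k))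
        = (pvMove (pvApplyGravity ms)).map (mpos k) := by
      rw [map_mvel_move, map_mpos_move, hG]
    have hcond : ((pvMove (pvApplyGravity ms)).map (mvel k)).all (fun v => v == 0)
        = (pvMove (pvApplyGravity ms)).all
            (fun m => PySem.List.pyGet? [m.vx, m.vy, m.vz] index == some 0) := by
      rw [List.all_map]
      congr 1
      funext m
      simp only [Function.comp_apply]
      rw [Hidx]
      simp [mvel]
    simp only [pvLoopA, pvLoopM, hfold, hpos', hcond]
    by_cases hc : (pvMove (pvApplyGravity ms)).all
        (fun m => PySem.List.pyGet? [m.vx, m.vy, m.vz] index == some 0)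
    · rw [if_pos hc, if_pos hc]
    · rw [if_neg hc, if_neg hc]
      exact ih (pvMove (pvApplyGravity ms)) (step + 1)

-- ---- bridge: the pairwise middle loop equals B's histogram/prefix-sum loop ----

-- sign of p relative to x: the per-pair velocity contribution on one axis
def sg (x p : Int) : Int := if x < p then 1 else if p < x then -1 else 0

-- contribution of the pair p to the velocity of moon i
def pvC (pos : List Int) (p : Nat × Nat) (i : Nat) : Int :=
  (if p.1 = i then sg (pos.getD i 0) (pos.getD p.2 0) else 0) +
  (if p.2 = i then sg (pos.getD i 0) (pos.getD p.1 0) else 0)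

theorem length_pvBPair (pos vel : List Int) (p : Nat × Nat) :
    (pvBPair pos vel p).length = vel.length := by
  simp only [pvBPair]
  split_ifs <;> simp

theorem getD_set_set (vel : List Int) {a b : Nat} (va vb : Int)
    (ha : a < vel.length) (hb : b < vel.length) (i : Nat) :
    ((vel.set a va).set b vb).getD i 0
      = if i = b then vb else if i = a then va else vel.getD i 0 := by
  by_cases hib : i = b
  · subst hib
    rw [if_pos rfl]
    exact getD_set_self _ _ _ (by simpa using hb)
  · rw [if_neg hib, getD_set_ne _ _ _ (fun h : b = i => hib h.symm)]
    by_cases hia : i = a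
    · subst hia
      rw [if_pos rfl]
      exact getD_set_self _ _ _ ha
    · rw [if_neg hia, getD_set_ne _ _ _ (fun h : a = i => hia h.symm)]

theorem pvBPair_getD (pos vel : List Int) {p : Nat × Nat}
    (h1 : p.1 < p.2) (h2 : p.2 < vel.length) (i : Nat) :
    (pvBPair pos vel p).getD i 0 = vel.getD i 0 + pvC pos p i := by
  obtain ⟨a, b⟩ := p
  simp only at h1 h2
  have ha : a < vel.length := lt_trans h1 h2
  have hne : a ≠ b := Nat.ne_of_lt h1
  have hvb1 : (vel.set a (vel.getD a 0 + 1)).getD b 0 = vel.getD b 0 :=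
    getD_set_ne vel _ _ hne
  have hvb2 : (vel.set a (vel.getD a 0 - 1)).getD b 0 = vel.getD b 0 :=
    getD_set_ne vel _ _ hne
  simp only [pvBPair, pvC, sg, hvb1, hvb2]
  by_cases hab : pos.getD a 0 < pos.getD b 0
  · rw [if_pos hab, getD_set_set vel _ _ ha h2 i]
    split_ifs <;> subst_vars <;> omega
  · rw [if_neg hab]
    by_cases hba : pos.getD b 0 < pos.getD a 0
    · rw [if_pos hba, getD_set_set vel _ _ ha h2 i]
      split_ifs <;> subst_vars <;> omega
    · rw [if_neg hba]
      split_ifs <;> subst_vars <;> omega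

theorem fold_pvBPair_getD (pos : List Int) :
    ∀ (ps : List (Nat × Nat)) (vel : List Int) (i : Nat),
      (∀ p ∈ ps, p.1 < p.2 ∧ p.2 < vel.length) →
      (ps.foldl (pvBPair pos) vel).getD i 0
        = vel.getD i 0 + (ps.map (fun p => pvC pos p i)).sum := by
  intro ps
  induction ps with
  | nil => intro vel i _; simp
  | cons p ps ih =>
    intro vel i hb
    have hp := hb p (by simp)
    have hrest : ∀ q ∈ ps, q.1 < q.2 ∧ q.2 < (pvBPair pos vel p).length := by
      intro q hq
      rw [length_pvBPair]
      exact hb q (by simp [hq])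
    rw [List.foldl_cons, ih (pvBPair pos vel p) i hrest,
        pvBPair_getD pos vel hp.1 hp.2 i]
    simp [add_assoc]

theorem length_fold_pvBPair (pos : List Int) (ps : List (Nat × Nat)) (vel : List Int) :
    (ps.foldl (pvBPair pos) vel).length = vel.length := by
  induction ps generalizing vel with
  | nil => rfl
  | cons p ps ih => rw [List.foldl_cons, ih, length_pvBPair]

theorem sum_indicator_range' (K : Int) (i : Nat) :
    ∀ (l s : Nat), (((List.range' s l).map (fun j => if j = i then K else 0)).sum
      = if s ≤ i ∧ i < s + l then K else 0) := by
  intro l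
  induction l with
  | zero => intro s; simp
  | succ m ih =>
    intro s
    rw [List.range'_succ, List.map_cons, List.sum_cons, ih (s + 1)]
    by_cases hs : s = i
    · subst hs
      rw [if_pos rfl, if_neg (by omega), if_pos (by omega)]
      ring
    · rw [if_neg hs]
      by_cases h2 : s + 1 ≤ i ∧ i < s + 1 + m
      · rw [if_pos h2, if_pos (by omega)]
        ring
      · rw [if_neg h2, if_neg (by omega)]
        ring

theorem sum_map_zero {α : Type} (l : List α) :
    (l.map (fun (_ : α) => (0 : Int))).sum = 0 := by
  simp

theorem sum_pvC (pos : List Int) {n i : Nat} (hi : i < n) :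
    ((pvPairs n).map (fun p => pvC pos p i)).sum
      = ((List.range n).map (fun j => sg (pos.getD i 0) (pos.getD j 0))).sum := by
  set x := pos.getD i 0 with hx
  have hrow : ∀ a : Nat, (((List.range' (a + 1) (n - (a + 1))).map
      (fun j => pvC pos (a, j) i)).sum)
      = (if a = i then ((List.range' (i + 1) (n - (i + 1))).map
          (fun j => sg x (pos.getD j 0))).sum
         else if a < i then sg x (pos.getD a 0) else 0) := by
    intro a
    by_cases ha : a = i
    · subst ha
      have hmc : ((List.range' (a + 1) (n - (a + 1))).map (fun j => pvC pos (a, j) a))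
          = (List.range' (a + 1) (n - (a + 1))).map (fun j => sg x (pos.getD j 0)) := by
        apply List.map_congr_left
        intro j hj
        have hji := List.mem_range'_1.mp hj
        have hja : j ≠ a := by omega
        simp [pvC, hx, hja, sg]
      rw [hmc]
      simp
    · rw [if_neg ha]
      have : ((List.range' (a + 1) (n - (a + 1))).map (fun j => pvC pos (a, j) i))
          = (List.range' (a + 1) (n - (a + 1))).map
              (fun j => if j = i then sg x (pos.getD a 0) else 0) := by
        apply List.map_congr_left
        intro j hj
        simp [pvC, ha, hx]
      rw [this, sum_indicator_range' _ i]
      have hiff : (a + 1 ≤ i ∧ i < a + 1 + (n - (a + 1))) ↔ a < i := by omega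
      simp only [hiff]
  -- sum over the flatMap structure
  have hflat : ((pvPairs n).map (fun p => pvC pos p i)).sum
      = ((List.range n).map (fun a =>
          (((List.range' (a + 1) (n - (a + 1))).map (fun j => pvC pos (a, j) i)).sum))).sum := by
    rw [pvPairs, List.map_flatMap, List.flatMap_def, List.sum_flatten, List.map_map]
    apply congrArg
    apply List.map_congr_left
    intro a _
    simp [Function.comp_def, List.map_map]
  rw [hflat]
  have hrows : ((List.range n).map (fun a =>
      (((List.range' (a + 1) (n - (a + 1))).map (fun j => pvC pos (a, j) i)).sum))).sum
      = ((List.range n).map (fun a =>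
          (if a = i then ((List.range' (i + 1) (n - (i + 1))).map
            (fun j => sg x (pos.getD j 0))).sum
           else if a < i then sg x (pos.getD a 0) else 0))).sum := by
    apply congrArg
    apply List.map_congr_left
    intro a _
    exact hrow a
  rw [hrows]
  -- split range n = range' 0 i ++ [i] ++ range' (i+1) (n-i-1)
  have hsplit : List.range n
      = List.range' 0 i ++ (i :: List.range' (i + 1) (n - (i + 1))) := by
    rw [List.range_eq_range']
    have h1 : (i :: List.range' (i + 1) (n - (i + 1))) = List.range' i (n - i) := by
      have : n - i = (n - i - 1) + 1 := by omega
      rw [this, List.range'_succ]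
      congr 1
    rw [h1]
    have := List.range'_append (s := 0) (m := i) (n := n - i) (step := 1)
    simp only [one_mul, zero_add] at this
    rw [this]
    congr 1
    omega
  have hgi : sg x (pos.getD i 0) = 0 := by simp [sg, hx]
  rw [hsplit]
  simp only [List.map_append, List.sum_append, List.map_cons, List.sum_cons]
  congr 1
  · apply congrArg
    apply List.map_congr_left
    intro a ha
    have := List.mem_range'_1.mp ha
    rw [if_neg (by omega), if_pos (by omega)]
  · simp only [if_true]
    have hz : ((List.range' (i + 1) (n - (i + 1))).map (fun a =>
        (if a = i then ((List.range' (i + 1) (n - (i + 1))).map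
          (fun j => sg x (pos.getD j 0))).sum
         else if a < i then sg x (pos.getD a 0) else 0))).sum = 0 := by
      have : ((List.range' (i + 1) (n - (i + 1))).map (fun a =>
          (if a = i then ((List.range' (i + 1) (n - (i + 1))).map
            (fun j => sg x (pos.getD j 0))).sum
           else if a < i then sg x (pos.getD a 0) else 0)))
          = (List.range' (i + 1) (n - (i + 1))).map (fun _ => (0 : Int)) := by
        apply List.map_congr_left
        intro a ha
        have := List.mem_range'_1.mp ha
        rw [if_neg (by omega), if_neg (by omega)]
      rw [this, sum_map_zero]
    rw [hz, hgi]
    ring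

theorem sum_sg (x : Int) : ∀ (l : List Int),
    ((l.map (fun p => sg x p)).sum
      = (l.length : Int) - 2 * (l.countP (fun p => decide (p < x)) : Int) - (l.count x : Int)) := by
  intro l
  induction l with
  | nil => simp
  | cons p rest ih =>
    rw [List.map_cons, List.sum_cons, ih]
    simp only [sg, List.length_cons, List.countP_cons, List.count_cons]
    by_cases h1 : x < p
    · have e1 : (decide (p < x)) = false := by simp; omega
      have e2 : (p == x) = false := by simp; omega
      simp only [e1, e2, if_pos h1, Bool.false_eq_true, if_false]
      push_cast
      ring
    · by_cases h2 : p < x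
      · have e1 : (decide (p < x)) = true := by simpa using h2
        have e2 : (p == x) = false := by simp; omega
        simp only [e1, e2, if_neg h1, if_pos h2, if_true, Bool.false_eq_true, if_false]
        push_cast
        ring
      · have heq : p = x := by omega
        have e1 : (decide (p < x)) = false := by simpa using h2
        have e2 : (p == x) = true := by simp [heq]
        simp only [e1, e2, if_neg h1, if_neg h2, if_true, Bool.false_eq_true, if_false]
        push_cast
        ring

theorem map_range_getD (l : List Int) :
    (List.range l.length).map (fun j => l.getD j 0) = l := by
  apply List.ext_getElem
  · simp
  · intro k h1 h2
    simp only [List.getElem_map, List.getElem_range]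
    rw [List.getD_eq_getElem _ _ (by simpa using h2)]

-- ---- B-side dict lemmas ----
theorem pvCnt_getD (pos : List Int) (v : Int) :
    (pvCnt pos).getD v 0 = (pos.count v : Int) := by
  unfold pvCnt
  rw [PySem.Dict.getD_foldl_insert_add_one]
  simp

theorem pvCnt_keys (pos : List Int) : (pvCnt pos).keys = PySem.Set.ofList pos := by
  unfold pvCnt
  rw [PySem.Dict.keys_foldl_insert]
  rw [PySem.Set.ofList_eq_foldl]
  simp [PySem.Set.update, PySem.Dict.keys_empty]

theorem getD_lessFold_of_not_mem (cnt : PySem.Dict Int Int) (x : Int) :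
    ∀ (ks : List Int) (st : PySem.Dict Int Int × Int), (∀ v ∈ ks, v ≠ x) →
      ((ks.foldl (fun st v => (st.1.insert v st.2, st.2 + cnt.getD v 0)) st).1).getD x 0
        = st.1.getD x 0 := by
  intro ks
  induction ks with
  | nil => intro st _; rfl
  | cons k t ih =>
    intro st h
    rw [List.foldl_cons, ih _ (fun v hv => h v (by simp [hv]))]
    exact PySem.Dict.getD_insert_of_ne _ _ _ (fun hx => h k (by simp) hx.symm)

theorem lessFold_getD (cnt : PySem.Dict Int Int) :
    ∀ (ks : List Int) (d : PySem.Dict Int Int) (acc : Int),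
      ks.Pairwise (· < ·) → ∀ x ∈ ks,
      ((ks.foldl (fun st v => (st.1.insert v st.2, st.2 + cnt.getD v 0)) (d, acc)).1).getD x 0
        = acc + ((ks.filter (fun v => decide (v < x))).map (fun v => cnt.getD v 0)).sum := by
  intro ks
  induction ks with
  | nil => intro d acc _ x hx; cases hx
  | cons k t ih =>
    intro d acc hpw x hx
    have hklt : ∀ v ∈ t, k < v := fun v hv => (List.pairwise_cons.mp hpw).1 v hv
    have hpt : t.Pairwise (· < ·) := (List.pairwise_cons.mp hpw).2
    rcases List.mem_cons.mp hx with hxk | hxt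
    · subst hxk
      rw [List.foldl_cons]
      rw [getD_lessFold_of_not_mem cnt x t _
        (fun v hv => by have := hklt v hv; omega)]
      simp only
      rw [PySem.Dict.getD_insert_self]
      have hf : (x :: t).filter (fun v => decide (v < x)) = [] := by
        rw [List.filter_cons]
        simp only [decide_eq_true_eq]
        rw [if_neg (by omega)]
        apply List.filter_eq_nil_iff.mpr
        intro v hv
        simp only [decide_eq_true_eq]
        have := hklt v hv
        omega
      rw [hf]
      simp
    · rw [List.foldl_cons]
      have := ih (d.insert k acc) (acc + cnt.getD k 0) hpt x hxt
      rw [this]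
      have hkx : k < x := hklt x hxt
      rw [List.filter_cons]
      simp only [decide_eq_true_eq]
      rw [if_pos hkx, List.map_cons, List.sum_cons]
      ring

theorem sum_indicator_nodup (p : Int) (c : Int) :
    ∀ (l : List Int), l.Nodup →
      ((l.map (fun v => if p = v then c else 0)).sum = if p ∈ l then c else 0) := by
  intro l
  induction l with
  | nil => simp
  | cons k t ih =>
    intro hnd
    obtain ⟨hk, ht⟩ := List.nodup_cons.mp hnd
    rw [List.map_cons, List.sum_cons, ih ht]
    by_cases hp : p = k
    · subst hp
      rw [if_pos rfl, if_neg hk, if_pos (by simp)]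
      ring
    · rw [if_neg hp]
      by_cases hm : p ∈ t
      · rw [if_pos hm, if_pos (by simp [hm])]
        ring
      · rw [if_neg hm, if_neg (by simp [hp, hm])]
        ring

theorem count_split (x : Int) (S : List Int) (hnd : S.Nodup) :
    ∀ (pos : List Int), (∀ p ∈ pos, p ∈ S) →
      (((S.filter (fun v => decide (v < x))).map (fun v => (pos.count v : Int))).sum
        = (pos.countP (fun p => decide (p < x)) : Int)) := by
  intro pos
  induction pos with
  | nil => intro _; simp
  | cons p rest ih =>
    intro hmem
    have hrest := ih (fun q hq => hmem q (by simp [hq]))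
    have hcong : (S.filter (fun v => decide (v < x))).map (fun v => ((p :: rest).count v : Int))
        = (S.filter (fun v => decide (v < x))).map
            (fun v => (rest.count v : Int) + (if p = v then (1 : Int) else 0)) := by
      apply List.map_congr_left
      intro v _
      rw [List.count_cons]
      by_cases h : p = v
      · simp [h]
      · have hb : (p == v) = false := by simp [h]
        simp [hb, h]
    rw [hcong, PySem.List.sum_map_add_int, hrest,
        sum_indicator_nodup p 1 _ (hnd.filter _)]
    rw [List.countP_cons]
    by_cases hp : p < x
    · rw [if_pos (by
        rw [List.mem_filter]
        exact ⟨hmem p (by simp), by simpa using hp⟩),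
        if_pos (by simpa using hp)]
      push_cast
      ring
    · rw [if_neg (fun hc => hp (by simpa using (List.mem_filter.mp hc).2)),
        if_neg (by simpa using hp)]
      push_cast
      ring

-- the prefix-sum dict holds, at each value occurring in pos, the number of strictly
-- smaller axis values
theorem pvLess_getD (pos : List Int) (x : Int) (hx : x ∈ pos) :
    (pvLess (pvCnt pos)).getD x 0 = (pos.countP (fun p => decide (p < x)) : Int) := by
  have hkeys : (pvCnt pos).keys = PySem.Set.ofList pos := pvCnt_keys pos
  have hperm : (PySem.List.sorted (pvCnt pos).keys (fun v => v)).Perm (PySem.Set.ofList pos) := by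
    rw [hkeys]
    exact PySem.List.sorted_perm _ _ _
  have hnd : (PySem.List.sorted (pvCnt pos).keys (fun v => v)).Nodup :=
    hperm.nodup_iff.mpr (PySem.Set.nodup_ofList pos)
  have hmem : ∀ p ∈ pos, p ∈ PySem.List.sorted (pvCnt pos).keys (fun v => v) :=
    fun p hp => hperm.mem_iff.mpr ((PySem.Set.mem_ofList pos p).mpr hp)
  have hle : (PySem.List.sorted (pvCnt pos).keys (fun v => v)).Pairwise (fun a b => a ≤ b) :=
    PySem.List.sorted_pairwise _ _
  have hlt : (PySem.List.sorted (pvCnt pos).keys (fun v => v)).Pairwise (· < ·) :=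
    (hle.and hnd).imp (fun h => lt_of_le_of_ne h.1 h.2)
  have hxks : x ∈ PySem.List.sorted (pvCnt pos).keys (fun v => v) := hmem x hx
  unfold pvLess
  rw [lessFold_getD (pvCnt pos) _ PySem.Dict.empty 0 hlt x hxks, zero_add]
  have hc : ((PySem.List.sorted (pvCnt pos).keys (fun v => v)).filter
        (fun v => decide (v < x))).map (fun v => (pvCnt pos).getD v 0)
      = ((PySem.List.sorted (pvCnt pos).keys (fun v => v)).filter
          (fun v => decide (v < x))).map (fun v => (pos.count v : Int)) := by
    apply List.map_congr_left
    intro v _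
    exact pvCnt_getD pos v
  rw [hc, count_split x _ hnd pos hmem]

-- step lemma: one middle-loop velocity update equals one B-loop velocity update
theorem vel_step_eq (pos vel : List Int) (hv : vel.length = pos.length) :
    (pvPairs pos.length).foldl (pvBPair pos) vel
      = (List.range pos.length).map (fun i =>
          vel.getD i 0 + ((pos.length : Int) - (pvLess (pvCnt pos)).getD (pos.getD i 0) 0
            - (pvCnt pos).getD (pos.getD i 0) 0)
            - (pvLess (pvCnt pos)).getD (pos.getD i 0) 0) := by
  have hlen : ((pvPairs pos.length).foldl (pvBPair pos) vel).length = pos.length := by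
    rw [length_fold_pvBPair, hv]
  apply List.ext_getElem
  · simp [hlen]
  · intro i h1 h2
    have hi : i < pos.length := by rw [hlen] at h1; exact h1
    rw [← List.getD_eq_getElem _ 0 h1,
        fold_pvBPair_getD pos _ vel i
          (fun p hp => ⟨(pvPairs_mem hp).1, by rw [hv]; exact (pvPairs_mem hp).2⟩),
        sum_pvC pos hi]
    have hmm : ((List.range pos.length).map (fun j => sg (pos.getD i 0) (pos.getD j 0)))
        = ((List.range pos.length).map (fun j => pos.getD j 0)).map
            (fun p => sg (pos.getD i 0) p) := by
      rw [List.map_map]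
      rfl
    rw [hmm, map_range_getD, sum_sg]
    rw [List.getElem_map, List.getElem_range]
    have hxmem : pos.getD i 0 ∈ pos := by
      rw [List.getD_eq_getElem _ _ hi]
      exact List.getElem_mem _
    rw [pvLess_getD pos _ hxmem, pvCnt_getD pos _]
    ring

theorem zip_eq_map_range (pos velB : List Int) (h : velB.length = pos.length) :
    List.zipWith (· + ·) pos velB
      = (List.range pos.length).map (fun i => pos.getD i 0 + velB.getD i 0) := by
  apply List.ext_getElem
  · simp [h]
  · intro i h1 h2
    have hi : i < pos.length := by simp [h] at h1; omega
    rw [List.getElem_zipWith, List.getElem_map, List.getElem_range,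
        List.getD_eq_getElem _ _ hi, List.getD_eq_getElem _ _ (by omega : i < velB.length)]

theorem loopM_eq_loopC :
    ∀ (fuel : Nat) (pos vel : List Int) (step : Int), vel.length = pos.length →
      pvLoopM pos vel step fuel = pvLoopC pos vel step fuel := by
  intro fuel
  induction fuel with
  | zero => intros; rfl
  | succ m ih =>
    intro pos vel step hv
    have hstep := vel_step_eq pos vel hv
    simp only [pvLoopM, pvLoopC]
    rw [← hstep]
    have hBlen : ((pvPairs pos.length).foldl (pvBPair pos) vel).length = pos.length := by
      rw [length_fold_pvBPair, hv]
    rw [← zip_eq_map_range pos _ hBlen]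
    by_cases hc : ((pvPairs pos.length).foldl (pvBPair pos) vel).all (fun v => v == 0)
    · rw [if_pos hc, if_pos hc]
    · rw [if_neg hc, if_neg hc]
      exact ih _ _ (step + 1)
        (by rw [hBlen, List.length_zipWith, hBlen]; omega)

-- ---- parsing relation (A's moons project to B's positions and zero velocities) ----
theorem partsInts_ok : ∀ (parts : List String), parts.all pvPartOk = true →
    ∃ vs, pvPartsInts? parts = some vs ∧ vs.length = parts.length := by
  intro parts
  induction parts with
  | nil => exact fun _ => ⟨[], rfl, rfl⟩
  | cons p ps ih =>
    intro h
    rw [List.all_cons, Bool.and_eq_true] at h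
    obtain ⟨hp, hps⟩ := h
    unfold pvPartOk at hp
    cases hsf : PySem.Str.split? p "=" with
    | none => simp [hsf] at hp
    | some fields =>
      simp only [hsf] at hp
      cases hg : PySem.List.pyGet? fields 1 with
      | none => simp [hg] at hp
      | some s =>
        simp only [hg] at hp
        cases hi : PySem.Int.ofStr? s with
        | none => simp [hi] at hp
        | some v =>
          obtain ⟨vs, hvs, hlen⟩ := ih hps
          exact ⟨v :: vs, by simp [pvPartsInts?, hsf, hg, hi, hvs], by simp [hlen]⟩

theorem lineOk_parse (l : String) (h : pvLineOk l = true) :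
    ∃ vals, parseLine? l = some vals ∧ 3 ≤ vals.length := by
  unfold pvLineOk at h
  cases hs : PySem.Str.split? (PySem.Str.slice l (some 1) (some (-1))) "," with
  | none => simp [hs] at h
  | some parts =>
    simp only [hs, Bool.and_eq_true, decide_eq_true_iff] at h
    obtain ⟨h3, hall⟩ := h
    obtain ⟨vs, hvs, hlen⟩ := partsInts_ok parts hall
    exact ⟨vs, by simp [parseLine?, hs, hvs], by omega⟩

theorem parse_rel (index : Int) (k : Nat)
    (Hidx : ∀ a b c : Int, PySem.List.pyGet? [a, b, c] index = some ([a, b, c].getD k 0)) :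
    ∀ (data : List String),
      data.all pvLineOk = true →
      ∃ ms, createMoons? data = some ms ∧
        pvParsePos? index data = some (ms.map (mpos k)) ∧
        ms.map (mvel k) = List.replicate ms.length 0 := by
  intro data
  induction data with
  | nil => intro _; exact ⟨[], rfl, rfl, rfl⟩
  | cons l rest ih =>
    intro hall
    rw [List.all_cons, Bool.and_eq_true] at hall
    obtain ⟨hl, hrest⟩ := hall
    obtain ⟨ms, hA, hB, hvel⟩ := ih hrest
    obtain ⟨vals, hpl, hlen⟩ := lineOk_parse l hl
    · have h0 : vals[0]? = some (vals[0]'(by omega)) := List.getElem?_eq_getElem (by omega)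
      have h1 : vals[1]? = some (vals[1]'(by omega)) := List.getElem?_eq_getElem (by omega)
      have h2 : vals[2]? = some (vals[2]'(by omega)) := List.getElem?_eq_getElem (by omega)
      refine ⟨⟨vals[0]'(by omega), vals[1]'(by omega), vals[2]'(by omega), 0, 0, 0⟩ :: ms,
        ?_, ?_, ?_⟩
      · simp [createMoons?, hpl, h0, h1, h2, hA]
      · simp only [pvParsePos?, hpl, h0, h1, h2, hB, Hidx]
        simp [mpos]
      · simp [hvel, mvel_new, List.replicate_succ]

theorem main_case (data : List String) (index : Int) (k : Nat)
    (Hidx : ∀ a b c : Int, PySem.List.pyGet? [a, b, c] index = some ([a, b, c].getD k 0))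
    (hparse : data.all pvLineOk = true) :
    solve_axis data index = solve_axis_alt data index := by
  obtain ⟨ms, hA, hB, hvel⟩ := parse_rel index k Hidx data hparse
  simp only [solve_axis, solve_axis_alt, hA, hB]
  rw [List.length_map, ← hvel]
  rw [loop_rel index k Hidx pvFuel ms 0]
  exact loopM_eq_loopC pvFuel (ms.map (mpos k)) (ms.map (mvel k)) 0 (by simp)

theorem loop_nil (index : Int) : ∀ (fuel : Nat) (step : Int),
    pvLoopA index [] step fuel = pvLoopC [] [] step fuel := by
  intro fuel step
  cases fuel with
  | zero => rfl
  | succ n => simp [pvLoopA, pvLoopC, pvApplyGravity, pvMove, pvPairs]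

-- ===== VERDICT (by name: the statement is the Claim_ definition above) =====
theorem solve_axis_spec : Claim_equal_solve_axis := by
  intro data index hDom hPre
  obtain ⟨hparse, hidx⟩ := hPre
  unfold Spec_solve_axis
  rcases hdata : data with _ | ⟨l, rest⟩
  · simp [solve_axis, solve_axis_alt, createMoons?, pvParsePos?]
    exact loop_nil index pvFuel 0
  · rcases hidx with h | ⟨hlo, hhi⟩
    · exact absurd h (by simp [hdata])
    · subst hdata
      interval_cases index
      · refine main_case _ _ 0 ?_ hparse
        intro a b c
        have e : PySem.List.pyIdx? 3 (-3) = some 0 := by decide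
        simp [PySem.List.pyGet?, e, List.getD]
      · refine main_case _ _ 1 ?_ hparse
        intro a b c
        have e : PySem.List.pyIdx? 3 (-2) = some 1 := by decide
        simp [PySem.List.pyGet?, e, List.getD]
      · refine main_case _ _ 2 ?_ hparse
        intro a b c
        have e : PySem.List.pyIdx? 3 (-1) = some 2 := by decide
        simp [PySem.List.pyGet?, e, List.getD]
      · refine main_case _ _ 0 ?_ hparse
        intro a b c
        have e : PySem.List.pyIdx? 3 0 = some 0 := by decide
        simp [PySem.List.pyGet?, e, List.getD]
      · refine main_case _ _ 1 ?_ hparse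
        intro a b c
        have e : PySem.List.pyIdx? 3 1 = some 1 := by decide
        simp [PySem.List.pyGet?, e, List.getD]
      · refine main_case _ _ 2 ?_ hparse
        intro a b c
        have e : PySem.List.pyIdx? 3 2 = some 2 := by decide
        simp [PySem.List.pyGet?, e, List.getD]
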